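-- pv_equiv track=rewrite | github.com/billrollins/ecothrift-dashboard | printserver/services/printer_manager.py | _flags_to_status
-- ===== SOURCE A (Python) =====
-- _STATUS_MAP: dict[int, str] = {
--     0x00000000: "ready",
--     0x00000001: "paused",
--     0x00000002: "error",
--     0x00000004: "pending_deletion",
--     0x00000008: "paper_jam",
--     0x00000010: "paper_out",
--     0x00000020: "manual_feed",
--     0x00000040: "paper_problem",
--     0x00000080: "offline",
--     0x00000100: "io_active",
--     0x00000200: "busy",
--     0x00000400: "printing",
--     0x00000800: "output_bin_full",
--     0x00001000: "not_available",
--     0x00002000: "waiting",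
--     0x00004000: "processing",
--     0x00008000: "initializing",
--     0x00010000: "warming_up",
--     0x00020000: "toner_low",
--     0x00040000: "no_toner",
--     0x00080000: "page_punt",
--     0x00100000: "user_intervention",
--     0x00200000: "out_of_memory",
--     0x00400000: "door_open",
--     0x00800000: "server_unknown",
--     0x01000000: "power_save",
-- }
--
-- def _flags_to_status(flags: int) -> str:
--     if flags == 0:
--         return "ready"
--     parts: list[str] = []
--     for bit, label in _STATUS_MAP.items():
--         if bit and flags & bit:
--             parts.append(label)
--     return ", ".join(parts) if parts else "ready"
-- ===== SOURCE B (Python) =====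
-- _STATUS_MAP: dict[int, str] = {
--     0x00000000: "ready",
--     0x00000001: "paused",
--     0x00000002: "error",
--     0x00000004: "pending_deletion",
--     0x00000008: "paper_jam",
--     0x00000010: "paper_out",
--     0x00000020: "manual_feed",
--     0x00000040: "paper_problem",
--     0x00000080: "offline",
--     0x00000100: "io_active",
--     0x00000200: "busy",
--     0x00000400: "printing",
--     0x00000800: "output_bin_full",
--     0x00001000: "not_available",
--     0x00002000: "waiting",
--     0x00004000: "processing",
--     0x00008000: "initializing",
--     0x00010000: "warming_up",
--     0x00020000: "toner_low",
--     0x00040000: "no_toner",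
--     0x00080000: "page_punt",
--     0x00100000: "user_intervention",
--     0x00200000: "out_of_memory",
--     0x00400000: "door_open",
--     0x00800000: "server_unknown",
--     0x01000000: "power_save",
-- }
--
--
-- def _flags_to_status(flags: int) -> str:
--     # Mask to the 25 bits that carry a status label, then shift the mask down,
--     # collecting the label of each set bit low-to-high; no dict iteration.
--     m = flags & 0x1FFFFFF
--     parts: list[str] = []
--     bit = 1
--     while m:
--         if m & 1:
--             parts.append(_STATUS_MAP[bit])
--         m >>= 1
--         bit <<= 1
--     return ", ".join(parts) if parts else "ready"
-- ===== Notes on version B (the rewrite author's own statement) =====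
-- stated objective: alternative
-- what changed: Instead of iterating over all 26 entries of _STATUS_MAP and testing each key against the flags, B masks the flags to the 25 labelled bits once and walks the masked value itself bit by bit (shift-and-test loop), doing a direct dict lookup only for the bits that exist; the loop stops as soon as no set bits remain and the flags==0 special case disappears.
import Mathlib
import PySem

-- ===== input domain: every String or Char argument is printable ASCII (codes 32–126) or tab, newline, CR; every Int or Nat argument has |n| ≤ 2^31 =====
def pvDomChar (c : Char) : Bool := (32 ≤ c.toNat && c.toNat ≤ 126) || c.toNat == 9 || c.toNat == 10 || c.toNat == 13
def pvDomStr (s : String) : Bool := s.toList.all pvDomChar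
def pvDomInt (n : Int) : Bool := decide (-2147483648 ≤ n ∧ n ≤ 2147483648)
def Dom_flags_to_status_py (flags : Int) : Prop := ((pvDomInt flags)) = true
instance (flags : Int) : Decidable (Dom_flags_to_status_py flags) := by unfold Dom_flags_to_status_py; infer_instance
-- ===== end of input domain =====

-- B walks the 25-bit-masked flags value itself with a shift-and-test loop instead of
-- iterating over all 26 map entries; same return value, alternative algorithm.

-- ===== PORT A =====

-- _STATUS_MAP as an association list in insertion order
def statusMap : List (Int × String) :=
  [(0, "ready"), (1, "paused"), (2, "error"), (4, "pending_deletion"), (8, "paper_jam"),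
   (16, "paper_out"), (32, "manual_feed"), (64, "paper_problem"), (128, "offline"),
   (256, "io_active"), (512, "busy"), (1024, "printing"), (2048, "output_bin_full"),
   (4096, "not_available"), (8192, "waiting"), (16384, "processing"), (32768, "initializing"),
   (65536, "warming_up"), (131072, "toner_low"), (262144, "no_toner"), (524288, "page_punt"),
   (1048576, "user_intervention"), (2097152, "out_of_memory"), (4194304, "door_open"),
   (8388608, "server_unknown"), (16777216, "power_save")]

def flags_to_status_py (flags : Int) : String :=
  if flags = 0 then "ready"
  else
    let parts : List String :=
      statusMap.foldl
        (fun parts p => if p.1 ≠ 0 ∧ PySem.Int.band flags p.1 ≠ 0 then parts ++ [p.2] else parts) []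
    if parts = [] then "ready" else PySem.Str.join ", " parts

-- ===== PORT B =====

-- _STATUS_MAP[bit] for the bit values the loop can produce (a set bit of the 25-bit mask);
-- the catch-all is unreachable from the loop below.
def bitLabel : Nat → String
  | 1 => "paused"
  | 2 => "error"
  | 4 => "pending_deletion"
  | 8 => "paper_jam"
  | 16 => "paper_out"
  | 32 => "manual_feed"
  | 64 => "paper_problem"
  | 128 => "offline"
  | 256 => "io_active"
  | 512 => "busy"
  | 1024 => "printing"
  | 2048 => "output_bin_full"
  | 4096 => "not_available"
  | 8192 => "waiting"
  | 16384 => "processing"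
  | 32768 => "initializing"
  | 65536 => "warming_up"
  | 131072 => "toner_low"
  | 262144 => "no_toner"
  | 524288 => "page_punt"
  | 1048576 => "user_intervention"
  | 2097152 => "out_of_memory"
  | 4194304 => "door_open"
  | 8388608 => "server_unknown"
  | 16777216 => "power_save"
  | _ => ""

-- the 'while m:' loop of Source B (m is the masked, hence nonnegative, flags value)
def altLoop (m : Nat) (bit : Nat) (parts : List String) : List String :=
  if _h : m = 0 then parts
  else altLoop (m >>> 1) (bit <<< 1) (if m &&& 1 ≠ 0 then parts ++ [bitLabel bit] else parts)
termination_by m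
decreasing_by simp only [Nat.shiftRight_one]; omega

def flags_to_status_py_alt (flags : Int) : String :=
  -- flags & 0x1FFFFFF is nonnegative, so carrying it as a Nat is exact
  let m : Nat := (PySem.Int.band flags 33554431).toNat
  let parts : List String := altLoop m 1 []
  if parts = [] then "ready" else PySem.Str.join ", " parts

-- ===== PRECONDITION & SPEC =====
def Spec_flags_to_status_py (flags : Int) (out : String) : Prop := out = flags_to_status_py_alt flags
instance (flags : Int) (out : String) : Decidable (Spec_flags_to_status_py flags out) := by unfold Spec_flags_to_status_py; infer_instance

-- ===== CLAIM (what is proved, stated in full; the proofs are below) =====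
def Claim_equal_flags_to_status_py : Prop := ∀ (flags : Int), Dom_flags_to_status_py flags → Spec_flags_to_status_py flags (flags_to_status_py flags)

-- ===== LEMMAS AND PROOFS =====

-- B's loop, characterised: it emits, low bit to high, the labels of the set bits of m.
theorem altLoop_spec : ∀ (k m bit : Nat) (parts : List String), m < 2 ^ k →
    altLoop m bit parts
      = parts ++ (List.range k).filterMap
          (fun j => if m.testBit j then some (bitLabel (bit <<< j)) else none) := by
  intro k
  induction k with
  | zero =>
    intro m bit parts hm
    have : m = 0 := by omega
    subst this
    rw [altLoop]
    simp
  | succ k ih =>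
    intro m bit parts hm
    by_cases hm0 : m = 0
    · subst hm0
      rw [altLoop]
      simp [Nat.zero_testBit]
    · rw [altLoop, dif_neg hm0]
      have h2 : (2:Nat) ^ (k+1) = 2 * 2 ^ k := by ring
      have hlt : m >>> 1 < 2 ^ k := by
        rw [Nat.shiftRight_one]; omega
      rw [ih _ _ _ hlt]
      have htail : (List.range k).filterMap
            (fun j => if (m >>> 1).testBit j then some (bitLabel ((bit <<< 1) <<< j)) else none)
          = (List.range k).filterMap
            (fun j => if m.testBit (j+1) then some (bitLabel (bit <<< (j+1))) else none) := by
        apply List.filterMap_congr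
        intro j _
        have h1 : m.testBit (j+1) = (m >>> 1).testBit j := by
          rw [Nat.shiftRight_one]; exact Nat.testBit_succ m j
        have hsh : bit <<< (j+1) = (bit <<< 1) <<< j := by
          rw [show j + 1 = 1 + j from Nat.add_comm j 1, Nat.shiftLeft_add]
        rw [h1, hsh]
      rw [htail, List.range_succ_eq_map, List.filterMap_cons, List.filterMap_map]
      by_cases hb : m % 2 = 1
      · have hc : m &&& 1 ≠ 0 := by rw [Nat.and_one_is_mod, hb]; omega
        have ht0 : m.testBit 0 = true := by rw [Nat.testBit_zero]; simp [hb]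
        simp only [if_pos hc, ht0, if_pos, Nat.shiftLeft_zero]
        simp
      · have hc : ¬ (m &&& 1 ≠ 0) := by rw [Nat.and_one_is_mod]; omega
        have ht0 : m.testBit 0 = false := by rw [Nat.testBit_zero]; simp [hb]
        simp only [if_neg hc, ht0]
        simp

-- Python's `flags & bit` test for the key bit 2^j, read off the masked value's bits.
theorem bridge (flags : Int) (j : Nat) (hj : j < 25) :
    (PySem.Int.band flags ((2:Int)^j) ≠ 0)
      ↔ ((PySem.Int.band flags 33554431).toNat.testBit j = true) := by
  have hp : ((2:Int)^j) = ((2^j : Nat) : Int) := by push_cast; ring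
  have hMnat : (33554431 : Nat) = 2 ^ 25 - 1 := by norm_num
  by_cases hf : (0:Int) ≤ flags
  · simp only [PySem.Int.band, if_pos hf, hp,
      if_pos (by positivity : (0:Int) ≤ ((2^j : Nat) : Int)),
      if_pos (by norm_num : (0:Int) ≤ 33554431)]
    rw [show ((33554431:Int)).toNat = 33554431 from rfl, Int.toNat_natCast]
    rw [Int.toNat_natCast]
    rw [Nat.and_two_pow, Nat.testBit_and, hMnat, Nat.testBit_two_pow_sub_one]
    cases hb : flags.toNat.testBit j
    · simp
    · simp [hj]
  · simp only [PySem.Int.band, if_neg hf, hp,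
      if_pos (by positivity : (0:Int) ≤ ((2^j : Nat) : Int)),
      if_pos (by norm_num : (0:Int) ≤ 33554431)]
    rw [show ((33554431:Int)).toNat = 33554431 from rfl, Int.toNat_natCast]
    rw [Int.toNat_natCast]
    set k : Nat := (-flags - 1).toNat with hk
    have hmod : 33554431 &&& k = k % 2 ^ 25 := by
      rw [Nat.and_comm, hMnat, Nat.and_two_pow_sub_one_eq_mod]
    have hmlt : k % 2 ^ 25 < 2 ^ 25 := Nat.mod_lt _ (by norm_num)
    have hsub : 33554431 - (33554431 &&& k) = 2 ^ 25 - (k % 2 ^ 25 + 1) := by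
      rw [hmod]; omega
    rw [hsub, Nat.testBit_two_pow_sub_succ hmlt, Nat.testBit_mod_two_pow]
    have hand : 2 ^ j &&& k = (k.testBit j).toNat * 2 ^ j := by
      rw [Nat.and_comm, Nat.and_two_pow]
    rcases Bool.eq_false_or_eq_true (k.testBit j) with hb | hb
    · rw [hand, hb]
      simp [hj]
    · rw [hand, hb]
      simp [hj]

-- a foldl that conditionally appends is a filterMap
theorem foldl_parts (C : Int × String → Prop) [DecidablePred C] :
    ∀ (l : List (Int × String)) (acc : List String),
      l.foldl (fun a p => if C p then a ++ [p.2] else a) acc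
        = acc ++ l.filterMap (fun p => if C p then some p.2 else none) := by
  intro l
  induction l with
  | nil => intro acc; simp
  | cons x xs ih =>
    intro acc
    rw [List.foldl_cons, ih, List.filterMap_cons]
    by_cases h : C x <;> simp [h]

-- the map's tail is exactly the 25 powers of two with their labels, in ascending order
theorem statusMap_tail :
    statusMap = (0, "ready") ::
      (List.range 25).map (fun j => (((2^j : Nat) : Int), bitLabel (1 <<< j))) := by
  decide

theorem band_mask_lt (flags : Int) : (PySem.Int.band flags 33554431).toNat < 2 ^ 25 := by
  by_cases hf : (0:Int) ≤ flags
  · simp only [PySem.Int.band, if_pos hf, if_pos (by norm_num : (0:Int) ≤ 33554431)]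
    rw [show ((33554431:Int)).toNat = 33554431 from rfl, Int.toNat_natCast]
    exact lt_of_le_of_lt Nat.and_le_right (by norm_num)
  · simp only [PySem.Int.band, if_neg hf, if_pos (by norm_num : (0:Int) ≤ 33554431)]
    rw [show ((33554431:Int)).toNat = 33554431 from rfl, Int.toNat_natCast]
    exact lt_of_le_of_lt (Nat.sub_le _ _) (by norm_num)

-- the two programs build the same parts list
theorem parts_eq (flags : Int) :
    statusMap.foldl
        (fun a p => if p.1 ≠ 0 ∧ PySem.Int.band flags p.1 ≠ 0 then a ++ [p.2] else a) []
      = altLoop (PySem.Int.band flags 33554431).toNat 1 [] := by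
  rw [altLoop_spec 25 _ 1 [] (band_mask_lt flags)]
  rw [foldl_parts, statusMap_tail]
  simp only [List.filterMap_cons]
  norm_num
  apply List.filterMap_congr
  intro j hj
  have hj25 : j < 25 := List.mem_range.mp hj
  by_cases hb : PySem.Int.band flags ((2:Int)^j) = 0
  · have ht : (PySem.Int.band flags 33554431).toNat.testBit j = false := by
      by_contra hc
      exact (bridge flags j hj25).mpr (by simpa using hc) hb
    simp [hb, ht]
  · have ht : (PySem.Int.band flags 33554431).toNat.testBit j = true :=
      (bridge flags j hj25).mp hb
    simp [hb, ht]

-- ===== VERDICT (by name: the statement is the Claim_ definition above) =====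
theorem flags_to_status_py_spec : Claim_equal_flags_to_status_py := by
  intro flags _
  have hB : flags_to_status_py_alt flags
      = (if altLoop (PySem.Int.band flags 33554431).toNat 1 [] = [] then "ready"
         else PySem.Str.join ", " (altLoop (PySem.Int.band flags 33554431).toNat 1 [])) := rfl
  by_cases h0 : flags = 0
  · subst h0
    have hz : altLoop (PySem.Int.band 0 33554431).toNat 1 [] = [] := by
      rw [show (PySem.Int.band 0 33554431).toNat = 0 from rfl,
        altLoop_spec 0 0 1 [] (by norm_num)]
      simp
    unfold Spec_flags_to_status_py flags_to_status_py
    rw [if_pos rfl, hB, hz]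
    simp
  · unfold Spec_flags_to_status_py flags_to_status_py
    rw [if_neg h0, parts_eq flags, hB]
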